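-- pv_equiv track=rewrite | github.com/shihjimmy/GWFA_thesis_code | GWFA_plot.py | flatten_path
-- ===== SOURCE A (Python) =====
-- def flatten_path(path):
--     """
--     Flatten the path and return the coordinates for each move.
--     The path is a list of (move, direction) tuples like [(2, 'M'), (3, 'I'), ...]
--     We convert it to a sequence of coordinates (x, y).
--     """
--     coordinates = []
--     x, y = 0, 0  # Starting position
--     coordinates.append((x, y))
--
--     for seg in path:
--         for move in seg:
--             num = int(move[0])
--             direction = move[1]  # 'M', 'I', 'D', 'U'
--
--             if direction == 'M':  # Match
--                 x += 1
--                 y += num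
--
--             elif direction == 'I':  # Insert
--                 x += 1
--
--             elif direction == 'D':  # Delete
--                 y += num
--
--             elif direction == 'U':  # Mismatch
--                 x += 1
--                 y += num
--
--             coordinates.append((x, y))
--
--     return coordinates
-- ===== SOURCE B (Python) =====
-- def flatten_path(path):
--     # Columnar (structure-of-arrays) approach: compute the x-column and the
--     # y-column of the coordinate sequence in two independent staged passes,
--     # then zip the columns back into (x, y) points.
--     moves = [move for seg in path for move in seg]
--
--     xs = [0]
--     x = 0
--     for move in moves:
--         if move[1] in ('M', 'I', 'U'):
--             x += 1
--         xs.append(x)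
--
--     ys = [0]
--     y = 0
--     for move in moves:
--         if move[1] in ('M', 'D', 'U'):
--             y += int(move[0])
--         ys.append(y)
--
--     return list(zip(xs, ys))
-- ===== Notes on version B (the rewrite author's own statement) =====
-- stated objective: alternative
-- what changed: Replaces the single stateful pass mutating a (x, y) pair with a columnar decomposition: the x-column and y-column are computed by two independent passes over the flattened moves and then zipped into coordinate pairs.
import Mathlib
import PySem

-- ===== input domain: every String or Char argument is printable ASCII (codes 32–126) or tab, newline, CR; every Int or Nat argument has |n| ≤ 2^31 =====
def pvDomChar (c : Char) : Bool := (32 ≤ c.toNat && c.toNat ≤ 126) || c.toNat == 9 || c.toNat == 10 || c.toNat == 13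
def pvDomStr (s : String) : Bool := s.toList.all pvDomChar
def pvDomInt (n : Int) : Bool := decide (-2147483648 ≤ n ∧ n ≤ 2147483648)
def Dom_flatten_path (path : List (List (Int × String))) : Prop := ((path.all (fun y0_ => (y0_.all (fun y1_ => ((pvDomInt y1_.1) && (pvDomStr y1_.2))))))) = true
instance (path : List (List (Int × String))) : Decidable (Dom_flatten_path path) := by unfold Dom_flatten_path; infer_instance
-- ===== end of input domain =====

-- B replaces A's single stateful (x,y) pass with a columnar decomposition: two independent passes compute the x- and y-columns, zipped into points (alternative decomposition; same cost).


-- ===== PORT A =====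
-- one step of A's inner loop body: update (x, y) by the branch on direction, append the new point
def flattenStepA (st : (Int × Int) × List (Int × Int)) (move : Int × String) :
    (Int × Int) × List (Int × Int) :=
  let num := move.1            -- num = int(move[0]); move[0] is already an int
  let direction := move.2
  let xy := st.1
  let xy' :=
    if direction == "M" then (xy.1 + 1, xy.2 + num)
    else if direction == "I" then (xy.1 + 1, xy.2)
    else if direction == "D" then (xy.1, xy.2 + num)
    else if direction == "U" then (xy.1 + 1, xy.2 + num)
    else xy
  (xy', st.2 ++ [xy'])

def flatten_path (path : List (List (Int × String))) : List (Int × Int) :=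
  (path.foldl (fun st seg => seg.foldl flattenStepA st) ((0, 0), [(0, 0)])).2

-- ===== PORT B =====
-- x-column step: x += 1 when direction in ('M','I','U')
def flattenStepX (x : Int) (move : Int × String) : Int :=
  if move.2 == "M" || move.2 == "I" || move.2 == "U" then x + 1 else x

-- y-column step: y += num when direction in ('M','D','U')
def flattenStepY (y : Int) (move : Int × String) : Int :=
  if move.2 == "M" || move.2 == "D" || move.2 == "U" then y + move.1 else y

-- Source B: flatten the moves, build xs and ys by two independent passes ([0] + running value,
-- i.e. scanl of the step over the moves), then zip the two columns
def flatten_path_alt (path : List (List (Int × String))) : List (Int × Int) :=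
  let moves := path.flatten
  let xs := List.scanl flattenStepX 0 moves
  let ys := List.scanl flattenStepY 0 moves
  xs.zip ys

-- ===== PRECONDITION & SPEC =====
def Spec_flatten_path (path : List (List (Int × String))) (out : List (Int × Int)) : Prop := out = flatten_path_alt path
instance (path : List (List (Int × String))) (out : List (Int × Int)) : Decidable (Spec_flatten_path path out) := by unfold Spec_flatten_path; infer_instance

-- ===== CLAIM (what is proved, stated in full; the proofs are below) =====
def Claim_equal_flatten_path : Prop := ∀ (path : List (List (Int × String))), Dom_flatten_path path → Spec_flatten_path path (flatten_path path)

-- ===== LEMMAS AND PROOFS =====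

-- the paired step: both columns advanced at once
def flattenStepXY (xy : Int × Int) (m : Int × String) : Int × Int :=
  (flattenStepX xy.1 m, flattenStepY xy.2 m)

-- a scanl starts with its seed
theorem scanl_head_cons_tail (xs : List (Int × String)) (b : Int × Int) :
    [b] ++ List.drop 1 (List.scanl flattenStepXY b xs) = List.scanl flattenStepXY b xs := by
  cases xs <;> simp [List.scanl_nil, List.scanl_cons]

-- one A-step advances both columns and appends the new point
theorem flattenStepA_eq (st : (Int × Int) × List (Int × Int)) (m : Int × String) :
    flattenStepA st m = (flattenStepXY st.1 m, st.2 ++ [flattenStepXY st.1 m]) := by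
  simp only [flattenStepA, flattenStepXY, flattenStepX, flattenStepY]
  split_ifs <;> simp_all

-- A's folded loop over any move list = scanl of the paired step, threaded through arbitrary state
theorem foldl_stepA_scanl (ms : List (Int × String)) :
    ∀ (xy : Int × Int) (acc : List (Int × Int)),
      ms.foldl flattenStepA (xy, acc) =
        (ms.foldl flattenStepXY xy,
         acc ++ (List.scanl flattenStepXY xy ms).drop 1) := by
  induction ms with
  | nil => simp
  | cons m ms ih =>
      intro xy acc
      simp only [List.foldl_cons, flattenStepA_eq, List.scanl_cons,
        List.drop_succ_cons, ih, List.append_assoc]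
      rw [List.drop_zero, scanl_head_cons_tail]

-- the paired scanl is the zip of the two column scanls
theorem scanl_pair_eq_zip (ms : List (Int × String)) :
    ∀ (x y : Int),
      List.scanl flattenStepXY (x, y) ms =
        (List.scanl flattenStepX x ms).zip (List.scanl flattenStepY y ms) := by
  induction ms with
  | nil => intro x y; simp
  | cons m ms ih =>
      intro x y
      simp [List.scanl_cons, flattenStepXY, ih]

theorem flatten_path_eq_alt (path : List (List (Int × String))) :
    flatten_path path = flatten_path_alt path := by
  unfold flatten_path flatten_path_alt
  rw [← List.foldl_flatten, foldl_stepA_scanl, ← scanl_pair_eq_zip]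
  exact scanl_head_cons_tail _ _

-- ===== VERDICT (by name: the statement is the Claim_ definition above) =====
theorem flatten_path_spec : Claim_equal_flatten_path := by
  intro path _
  exact flatten_path_eq_alt path
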